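-- pv_equiv track=rewrite | github.com/embydextrous/Interview | matrix/72-findCommonElementRowsSortedMatrix.py | findCommonElement
-- ===== SOURCE A (Python) =====
-- def findCommonElement(M):
--     R, C = len(M), len(M[0])
--     common = set()
--     p, q = 0, 0
--     while p < C and q < C:
--         if M[0][p] == M[1][q]:
--             common.add(M[0][p])
--             p += 1
--             q += 1
--         elif M[0][p] < M[1][q]:
--             p += 1
--         else:
--             q += 1
--     i = 2
--     while len(common) > 0 and i < R:
--         temp = set()
--         for j in range(C):
--             if M[i][j] in common:
--                 temp.add(M[i][j])
--         common = temp
--         i += 1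
--     return None if len(common) == 0 else common.pop()
-- ===== SOURCE B (Python) =====
-- def findCommonElement(M):
--     common = set(M[0])
--     for row in M[1:]:
--         common &= set(row)
--     return common.pop() if common else None
-- ===== Notes on version B (the rewrite author's own statement) =====
-- stated objective: simpler
-- what changed: Replaces the two-pointer sorted merge of the first two rows plus an indexed per-row membership filter loop with a single fold that intersects whole-row sets.
-- outside the precondition, e.g. on findCommonElement([[3, 1], [1, 3]]): A returns 3, B returns 1; on findCommonElement([[1, 2], [2, 1, 9]]): A returns 2, B returns 1; on findCommonElement([[-3, 9], [-3, 9]]): A returns 9, B returns 9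
import Mathlib
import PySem

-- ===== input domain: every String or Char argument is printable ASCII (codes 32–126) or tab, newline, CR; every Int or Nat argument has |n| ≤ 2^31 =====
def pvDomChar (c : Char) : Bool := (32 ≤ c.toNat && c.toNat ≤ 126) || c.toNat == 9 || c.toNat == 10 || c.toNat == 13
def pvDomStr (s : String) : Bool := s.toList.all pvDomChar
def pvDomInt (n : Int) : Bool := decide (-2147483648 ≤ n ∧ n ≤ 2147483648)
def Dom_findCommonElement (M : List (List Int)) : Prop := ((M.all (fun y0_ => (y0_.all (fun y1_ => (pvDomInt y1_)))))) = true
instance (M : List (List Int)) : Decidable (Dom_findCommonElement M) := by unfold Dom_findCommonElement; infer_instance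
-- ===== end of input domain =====

-- B replaces A's two-pointer merge of the first two rows plus an indexed membership filter
-- loop by one fold intersecting whole-row sets (objective: simpler; same asymptotic cost).


-- ===== PORT A =====
-- the first while loop: two-pointer merge over M[0], M[1] (r0, r1), indices p, q, bound C
def pyMergeLoop (r0 r1 : List Int) (C p q : Nat) (common : PySem.Set Int) : PySem.Set Int :=
  if _h : p < C ∧ q < C then
    if PySem.List.pyGetD r0 (p : Int) 0 = PySem.List.pyGetD r1 (q : Int) 0 then
      pyMergeLoop r0 r1 C (p + 1) (q + 1) (PySem.Set.add common (PySem.List.pyGetD r0 (p : Int) 0))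
    else if PySem.List.pyGetD r0 (p : Int) 0 < PySem.List.pyGetD r1 (q : Int) 0 then
      pyMergeLoop r0 r1 C (p + 1) q common
    else
      pyMergeLoop r0 r1 C p (q + 1) common
  else common
termination_by (C - p) + (C - q)
decreasing_by all_goals omega

-- the second while loop: filter common through row i, for i = 2 .. R-1
def pyFilterLoop (M : List (List Int)) (C R i : Nat) (common : PySem.Set Int) : PySem.Set Int :=
  if _h : 0 < common.length ∧ i < R then
    pyFilterLoop M C R (i + 1)
      ((PySem.List.pyRange 0 (C : Int) 1).foldl
        (fun temp j =>
          if PySem.Set.contains common (PySem.List.pyGetD (PySem.List.pyGetD M (i : Int) []) j 0) then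
            PySem.Set.add temp (PySem.List.pyGetD (PySem.List.pyGetD M (i : Int) []) j 0)
          else temp)
        PySem.Set.empty)
  else common
termination_by R - i

def findCommonElement (M : List (List Int)) : Option Int :=
  let R := M.length
  let C := (PySem.List.pyGetD M 0 []).length
  let common := pyMergeLoop (PySem.List.pyGetD M 0 []) (PySem.List.pyGetD M 1 []) C 0 0 PySem.Set.empty
  let common := pyFilterLoop M C R 2 common
  if common.length = 0 then none else common.head?

-- ===== PORT B =====
def findCommonElement_alt (M : List (List Int)) : Option Int :=
  let common := (PySem.List.slice M (some 1) none).foldl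
    (fun c row => PySem.Set.inter c (PySem.Set.ofList row))
    (PySem.Set.ofList (PySem.List.pyGetD M 0 []))
  match common with
  | [] => none
  | x :: _ => some x

-- ===== PRECONDITION & SPEC =====
-- Pre_ admits: any matrix whose first row is empty; any matrix of ≥ 2 rows where every element
-- of row 0 is below row 1's first element and no value is common to all rows; any matrix of
-- ≥ 2 rows with a prefix of rows 0..k (k ≥ 1, those rows at least as long as row 0) sharing NO
-- common value — in these cases both programs return None — and the main case: ≥ 2 rows,
-- rectangular, first two rows sorted ascending, at most one common value.  It thereby excludes: matrices with fewer than two rows and a nonempty first row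
-- (A raises IndexError on M[1]); rows shorter than row 0 (A's index loops raise there), rows
-- longer than row 0 when a common value exists (A silently reads only a len(M[0])-prefix — an
-- artefact of indexing by len(M[0])); a common value with unsorted first two rows (the two-pointer
-- merge then misses common values — sortedness is the function's stated precondition); and more
-- than one value common to all rows (set.pop's choice among them is hash-order accidental).
def Pre_findCommonElement (M : List (List Int)) : Prop :=
  (1 ≤ M.length ∧ M.headD [] = []) ∨
  (2 ≤ M.length ∧ (M.drop 1).headD [] ≠ [] ∧
   (∀ x ∈ M.headD [], x < ((M.drop 1).headD []).headD 0) ∧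
   (∀ x ∈ M.headD [], ∃ r ∈ M, x ∉ r)) ∨
  (2 ≤ M.length ∧ ∃ k, k < M.length ∧ 1 ≤ k ∧
   (∀ r ∈ (M.take (k + 1)).drop 1, (M.headD []).length ≤ r.length) ∧
   (∀ x ∈ M.headD [], ∃ r ∈ M.take (k + 1), x ∉ r)) ∨
  (2 ≤ M.length ∧
   (∀ r ∈ M, r.length = (M.headD []).length) ∧
   (M.headD []).Pairwise (· ≤ ·) ∧
   ((M.drop 1).headD []).Pairwise (· ≤ ·) ∧
   (∀ x ∈ M.headD [], ∀ y ∈ M.headD [],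
      (∀ r ∈ M, x ∈ r) → (∀ r ∈ M, y ∈ r) → x = y))
instance (M : List (List Int)) : Decidable (Pre_findCommonElement M) := by
  unfold Pre_findCommonElement; infer_instance

def pvWitness_findCommonElement : List (List Int) := [[1, 2, 3], [2, 3, 4], [2, 5, 6]]

def Spec_findCommonElement (M : List (List Int)) (out : Option Int) : Prop := out = findCommonElement_alt M
instance (M : List (List Int)) (out : Option Int) : Decidable (Spec_findCommonElement M out) := by unfold Spec_findCommonElement; infer_instance

-- ===== CLAIM (what is proved, stated in full; the proofs are below) =====
def Claim_equal_findCommonElement : Prop := ∀ (M : List (List Int)), Dom_findCommonElement M → Pre_findCommonElement M → Spec_findCommonElement M (findCommonElement M)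

-- ===== LEMMAS AND PROOFS =====
lemma sorted_drop_le {r : List Int} (hs : r.Pairwise (· ≤ ·)) {q : Nat} (hq : q < r.length) :
    ∀ x ∈ r.drop q, r[q] ≤ x := by
  intro x hx
  have hd : r.drop q = r[q] :: r.drop (q + 1) := List.drop_eq_getElem_cons hq
  have hp : (r.drop q).Pairwise (· ≤ ·) := hs.drop
  rw [hd] at hx hp
  rcases List.mem_cons.1 hx with rfl | hx'
  · exact le_refl _
  · exact (List.pairwise_cons.1 hp).1 x hx'

-- the merge loop collects exactly the values common to the two drops (sorted rows of length C)
lemma pyMergeLoop_mem (r0 r1 : List Int) (h0 : r0.Pairwise (· ≤ ·)) (h1 : r1.Pairwise (· ≤ ·))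
    (C p q : Nat) (hC0 : r0.length = C) (hC1 : r1.length = C) (common : PySem.Set Int) (x : Int) :
    x ∈ pyMergeLoop r0 r1 C p q common ↔ x ∈ common ∨ (x ∈ r0.drop p ∧ x ∈ r1.drop q) := by
  induction p, q, common using pyMergeLoop.induct r0 r1 C with
  | case1 p q common h heq ih =>
    have hp : p < r0.length := by omega
    have hq : q < r1.length := by omega
    have ha : PySem.List.pyGetD r0 (p : Int) 0 = r0[p] := by
      simp [PySem.List.pyGetD_natCast, List.getD, List.getElem?_eq_getElem hp]
    have hb : PySem.List.pyGetD r1 (q : Int) 0 = r1[q] := by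
      simp [PySem.List.pyGetD_natCast, List.getD, List.getElem?_eq_getElem hq]
    rw [pyMergeLoop, dif_pos h, if_pos heq, ih]
    rw [ha] at heq
    rw [hb] at heq
    rw [PySem.Set.mem_add, List.drop_eq_getElem_cons hp, List.drop_eq_getElem_cons hq, ha]
    simp only [List.mem_cons]
    constructor
    · rintro ((h1 | rfl) | ⟨hx0, hx1⟩)
      · exact Or.inl h1
      · exact Or.inr ⟨Or.inl rfl, Or.inl heq⟩
      · exact Or.inr ⟨Or.inr hx0, Or.inr hx1⟩
    · rintro (hc | ⟨rfl | hx0, hx1⟩)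
      · exact Or.inl (Or.inl hc)
      · exact Or.inl (Or.inr rfl)
      · rcases hx1 with h' | hx1
        · exact Or.inl (Or.inr (h' ▸ heq.symm ▸ rfl))
        · exact Or.inr ⟨hx0, hx1⟩
  | case2 p q common h hne hlt ih =>
    have hp : p < r0.length := by omega
    have hq : q < r1.length := by omega
    have ha : PySem.List.pyGetD r0 (p : Int) 0 = r0[p] := by
      simp [PySem.List.pyGetD_natCast, List.getD, List.getElem?_eq_getElem hp]
    have hb : PySem.List.pyGetD r1 (q : Int) 0 = r1[q] := by
      simp [PySem.List.pyGetD_natCast, List.getD, List.getElem?_eq_getElem hq]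
    rw [pyMergeLoop, dif_pos h, if_neg hne, if_pos hlt, ih]
    rw [ha, hb] at hlt
    rw [List.drop_eq_getElem_cons hp]
    simp only [List.mem_cons]
    constructor
    · rintro (hc | ⟨hx0, hx1⟩)
      · exact Or.inl hc
      · exact Or.inr ⟨Or.inr hx0, hx1⟩
    · rintro (hc | ⟨rfl | hx0, hx1⟩)
      · exact Or.inl hc
      · exact absurd (sorted_drop_le h1 hq _ hx1) (by omega)
      · exact Or.inr ⟨hx0, hx1⟩
  | case3 p q common h hne hnlt ih =>
    have hp : p < r0.length := by omega
    have hq : q < r1.length := by omega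
    have ha : PySem.List.pyGetD r0 (p : Int) 0 = r0[p] := by
      simp [PySem.List.pyGetD_natCast, List.getD, List.getElem?_eq_getElem hp]
    have hb : PySem.List.pyGetD r1 (q : Int) 0 = r1[q] := by
      simp [PySem.List.pyGetD_natCast, List.getD, List.getElem?_eq_getElem hq]
    rw [pyMergeLoop, dif_pos h, if_neg hne, if_neg hnlt, ih]
    rw [ha, hb] at hne hnlt
    rw [List.drop_eq_getElem_cons hq]
    simp only [List.mem_cons]
    constructor
    · rintro (hc | ⟨hx0, hx1⟩)
      · exact Or.inl hc
      · exact Or.inr ⟨hx0, Or.inr hx1⟩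
    · rintro (hc | ⟨hx0, rfl | hx1⟩)
      · exact Or.inl hc
      · exact absurd (sorted_drop_le h0 hp _ hx0) (by simp at hne hnlt; omega)
      · exact Or.inr ⟨hx0, hx1⟩
  | case4 p q common h =>
    rw [pyMergeLoop, dif_neg h]
    have : r0.drop p = [] ∨ r1.drop q = [] := by
      rcases Nat.lt_or_ge p C with hp | hp
      · right; apply List.drop_eq_nil_of_le; omega
      · left; apply List.drop_eq_nil_of_le; omega
    rcases this with h' | h' <;> simp [h']

lemma pyMergeLoop_nodup (r0 r1 : List Int) (C p q : Nat) (common : PySem.Set Int)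
    (h : common.Nodup) : (pyMergeLoop r0 r1 C p q common).Nodup := by
  induction p, q, common using pyMergeLoop.induct r0 r1 C with
  | case1 p q common hh heq ih =>
    rw [pyMergeLoop, dif_pos hh, if_pos heq]; exact ih (PySem.Set.nodup_add _ _ h)
  | case2 p q common hh hne hlt ih =>
    rw [pyMergeLoop, dif_pos hh, if_neg hne, if_pos hlt]; exact ih h
  | case3 p q common hh hne hnlt ih =>
    rw [pyMergeLoop, dif_pos hh, if_neg hne, if_neg hnlt]; exact ih h
  | case4 p q common hh => rw [pyMergeLoop, dif_neg hh]; exact h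

-- the inner for-loop of the filter: membership characterisation, and nodup for any index list
lemma filter_fold_mem (common : PySem.Set Int) (row : List Int) (acc : PySem.Set Int) (x : Int) :
    x ∈ row.foldl
        (fun temp v => if PySem.Set.contains common v then PySem.Set.add temp v else temp) acc ↔
      x ∈ acc ∨ (x ∈ common ∧ x ∈ row) := by
  induction row generalizing acc with
  | nil => simp
  | cons a row ih =>
    simp only [List.foldl_cons, ih]
    by_cases h : a ∈ common
    · rw [if_pos ((PySem.Set.contains_iff common a).2 h)]
      simp only [PySem.Set.mem_add, List.mem_cons]
      constructor
      · rintro ((h1 | rfl) | h2)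
        · exact Or.inl h1
        · exact Or.inr ⟨h, Or.inl rfl⟩
        · exact Or.inr ⟨h2.1, Or.inr h2.2⟩
      · rintro (h1 | ⟨hc, rfl | hr⟩)
        · exact Or.inl (Or.inl h1)
        · exact Or.inl (Or.inr rfl)
        · exact Or.inr ⟨hc, hr⟩
    · rw [if_neg (fun hh => h ((PySem.Set.contains_iff common a).1 hh))]
      simp only [List.mem_cons]
      constructor
      · rintro (h1 | h2)
        · exact Or.inl h1
        · exact Or.inr ⟨h2.1, Or.inr h2.2⟩
      · rintro (h1 | ⟨hc, rfl | hr⟩)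
        · exact Or.inl h1
        · exact absurd hc h
        · exact Or.inr ⟨hc, hr⟩

lemma filter_fold_nodup {β : Type} (l : List β) (g : β → Int) (common acc : PySem.Set Int)
    (h : acc.Nodup) :
    (l.foldl
        (fun temp j => if PySem.Set.contains common (g j) then PySem.Set.add temp (g j) else temp)
        acc).Nodup := by
  induction l generalizing acc with
  | nil => exact h
  | cons a l ih =>
    simp only [List.foldl_cons]
    split
    · exact ih _ (PySem.Set.nodup_add acc (g a) h)
    · exact ih _ h

lemma pyFilterLoop_mem (M : List (List Int)) (C i : Nat)
    (hlen : ∀ r ∈ M, r.length = C) (common : PySem.Set Int) (x : Int) :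
    x ∈ pyFilterLoop M C M.length i common ↔ x ∈ common ∧ ∀ r ∈ M.drop i, x ∈ r := by
  induction i, common using pyFilterLoop.induct M C M.length with
  | case1 i common h ih =>
    have hi : i < M.length := h.2
    have hrow : PySem.List.pyGetD M (i : Int) [] = M[i] := by
      simp [PySem.List.pyGetD_natCast, List.getD, List.getElem?_eq_getElem hi]
    have hCrow : (C : Int) = ((M[i] : List Int).length : Int) := by
      rw [hlen M[i] (List.getElem_mem hi)]
    simp only [dite_eq_ite] at ih
    rw [pyFilterLoop, dif_pos h, ih]
    have hfold :
        (PySem.List.pyRange 0 (C : Int) 1).foldl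
          (fun temp j =>
            if PySem.Set.contains common (PySem.List.pyGetD (PySem.List.pyGetD M (i : Int) []) j 0) then
              PySem.Set.add temp (PySem.List.pyGetD (PySem.List.pyGetD M (i : Int) []) j 0)
            else temp)
          PySem.Set.empty =
        (M[i] : List Int).foldl
          (fun temp v => if PySem.Set.contains common v then PySem.Set.add temp v else temp)
          PySem.Set.empty := by
      rw [hrow, hCrow]
      exact PySem.List.foldl_pyRange_zero_pyGetD (M[i] : List Int) 0
        (fun temp v => if PySem.Set.contains common v then PySem.Set.add temp v else temp)
        PySem.Set.empty
    rw [hfold]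
    rw [List.drop_eq_getElem_cons hi]
    simp only [filter_fold_mem, List.mem_cons, PySem.Set.empty, List.not_mem_nil, false_or]
    constructor
    · rintro ⟨⟨hc, hr⟩, hrest⟩
      exact ⟨hc, fun r hr' => hr'.elim (fun e => e ▸ hr) (hrest r)⟩
    · rintro ⟨hc, hall⟩
      exact ⟨⟨hc, hall _ (Or.inl rfl)⟩, fun r hr' => hall r (Or.inr hr')⟩
  | case2 i common h =>
    rw [pyFilterLoop, dif_neg h]
    rcases Nat.lt_or_ge i M.length with hi | hi
    · -- common must be empty here
      have hc : common.length = 0 := by omega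
      have : common = [] := List.eq_nil_of_length_eq_zero hc
      subst this
      simp
    · rw [List.drop_eq_nil_of_le hi]
      simp

lemma pyFilterLoop_nodup (M : List (List Int)) (C R i : Nat) (common : PySem.Set Int)
    (h : common.Nodup) : (pyFilterLoop M C R i common).Nodup := by
  induction i, common using pyFilterLoop.induct M C R with
  | case1 i common hh ih =>
    rw [pyFilterLoop, dif_pos hh]
    simp only [dite_eq_ite] at ih
    exact ih (filter_fold_nodup _ _ common PySem.Set.empty List.nodup_nil)
  | case2 i common hh => rw [pyFilterLoop, dif_neg hh]; exact h

-- B's fold: successive intersections keep exactly the values in init and in every row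
lemma inter_fold_mem (rows : List (List Int)) (init : PySem.Set Int) (x : Int) :
    x ∈ rows.foldl (fun c row => PySem.Set.inter c (PySem.Set.ofList row)) init ↔
      x ∈ init ∧ ∀ r ∈ rows, x ∈ r := by
  induction rows generalizing init with
  | nil => simp
  | cons a rows ih =>
    simp only [List.foldl_cons, ih, PySem.Set.mem_inter, PySem.Set.mem_ofList, List.mem_cons]
    constructor
    · rintro ⟨⟨h1, h2⟩, h3⟩
      exact ⟨h1, fun r hr => hr.elim (fun e => e ▸ h2) (h3 r)⟩
    · rintro ⟨h1, h2⟩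
      exact ⟨⟨h1, h2 a (Or.inl rfl)⟩, fun r hr => h2 r (Or.inr hr)⟩

lemma inter_fold_nodup (rows : List (List Int)) (init : PySem.Set Int) (h : init.Nodup) :
    (rows.foldl (fun c row => PySem.Set.inter c (PySem.Set.ofList row)) init).Nodup := by
  induction rows generalizing init with
  | nil => exact h
  | cons a rows ih => exact ih _ (PySem.Set.nodup_inter init _ h)

-- two nodup lists characterised by the same subsingleton predicate are equal
lemma eq_of_subsingleton_char (S T : List Int) (hS : S.Nodup) (hT : T.Nodup) (P : Int → Prop)
    (hSm : ∀ x, x ∈ S ↔ P x) (hTm : ∀ x, x ∈ T ↔ P x)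
    (hu : ∀ x y, P x → P y → x = y) : S = T := by
  match S, T with
  | [], [] => rfl
  | [], b :: t => exact absurd ((hSm b).2 ((hTm b).1 List.mem_cons_self)) (by simp)
  | a :: s, [] => exact absurd ((hTm a).2 ((hSm a).1 List.mem_cons_self)) (by simp)
  | a :: s, b :: t =>
    have hab : a = b := hu a b ((hSm a).1 List.mem_cons_self) ((hTm b).1 List.mem_cons_self)
    subst hab
    have hs : s = [] := by
      rcases s with _ | ⟨c, s⟩
      · rfl
      · have : c = a := hu c a ((hSm c).1 (by simp)) ((hSm a).1 List.mem_cons_self)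
        subst this
        simp at hS
    have ht : t = [] := by
      rcases t with _ | ⟨c, t⟩
      · rfl
      · have : c = a := hu c a ((hTm c).1 (by simp)) ((hTm a).1 List.mem_cons_self)
        subst this
        simp at hT
    rw [hs, ht]

-- subset direction of the merge loop, without sortedness (rows at least C long)
lemma pyMergeLoop_subset (r0 r1 : List Int) (C p q : Nat)
    (hC0 : C ≤ r0.length) (hC1 : C ≤ r1.length) (common : PySem.Set Int) (x : Int)
    (hx : x ∈ pyMergeLoop r0 r1 C p q common) : x ∈ common ∨ (x ∈ r0 ∧ x ∈ r1) := by
  induction p, q, common using pyMergeLoop.induct r0 r1 C with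
  | case1 p q common h heq ih =>
    rw [pyMergeLoop, dif_pos h, if_pos heq] at hx
    rcases ih hx with hc | hr
    · rcases (PySem.Set.mem_add common _ x).1 hc with hc' | rfl
      · exact Or.inl hc'
      · refine Or.inr ⟨?_, ?_⟩
        · exact PySem.List.pyGetD_mem r0 0 (by unfold PySem.Raise.InRange; omega)
        · rw [heq]
          exact PySem.List.pyGetD_mem r1 0 (by unfold PySem.Raise.InRange; omega)
    · exact Or.inr hr
  | case2 p q common h hne hlt ih =>
    rw [pyMergeLoop, dif_pos h, if_neg hne, if_pos hlt] at hx
    exact ih hx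
  | case3 p q common h hne hnlt ih =>
    rw [pyMergeLoop, dif_pos h, if_neg hne, if_neg hnlt] at hx
    exact ih hx
  | case4 p q common h =>
    rw [pyMergeLoop, dif_neg h] at hx
    exact Or.inl hx

-- subset direction of the inner filter fold: anything in the result was in acc
-- or is a value of the row that was already in common
lemma filter_fold_subset {β : Type} (l : List β) (g : β → Int) (common acc : PySem.Set Int)
    (x : Int)
    (hx : x ∈ l.foldl
        (fun temp j => if PySem.Set.contains common (g j) then PySem.Set.add temp (g j) else temp)
        acc) : x ∈ acc ∨ (x ∈ common ∧ ∃ j ∈ l, x = g j) := by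
  induction l generalizing acc with
  | nil => exact Or.inl hx
  | cons a l ih =>
    simp only [List.foldl_cons] at hx
    by_cases hc : PySem.Set.contains common (g a) = true
    · rw [if_pos hc] at hx
      rcases ih _ hx with hacc | ⟨hxc, j, hj, rfl⟩
      · rcases (PySem.Set.mem_add acc (g a) x).1 hacc with h' | rfl
        · exact Or.inl h'
        · exact Or.inr ⟨(PySem.Set.contains_iff common (g a)).1 hc, a, by simp, rfl⟩
      · exact Or.inr ⟨hxc, j, by simp [hj], rfl⟩
    · rw [if_neg hc] at hx
      rcases ih _ hx with hacc | ⟨hxc, j, hj, rfl⟩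
      · exact Or.inl hacc
      · exact Or.inr ⟨hxc, j, by simp [hj], rfl⟩

-- subset direction of the filter loop: members of the result were in common and lie in
-- every row of index in [i, k] (only those rows are assumed long enough to be indexed safely)
lemma pyFilterLoop_subset_prefix (M : List (List Int)) (C i k : Nat)
    (hlen : ∀ j, i ≤ j → j ≤ k → ∀ hj : j < M.length, C ≤ M[j].length)
    (common : PySem.Set Int) (x : Int)
    (hx : x ∈ pyFilterLoop M C M.length i common) :
    x ∈ common ∧ ∀ r ∈ (M.take (k + 1)).drop i, x ∈ r := by
  induction i, common using pyFilterLoop.induct M C M.length with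
  | case1 i common h ih =>
    have hi : i < M.length := h.2
    simp only [dite_eq_ite] at ih
    rw [pyFilterLoop, dif_pos h] at hx
    obtain ⟨htemp, hrest⟩ := ih (fun j h1 h2 h3 => hlen j (by omega) h2 h3) hx
    rcases filter_fold_subset _ _ common PySem.Set.empty x htemp with hacc | ⟨hxc, j, hj, rfl⟩
    · exact absurd hacc (by simp [PySem.Set.empty])
    rcases Nat.lt_or_ge k i with hik2 | hik
    · -- beyond the prefix: nothing remains to check
      refine ⟨hxc, ?_⟩
      have : (M.take (k + 1)).drop i = [] :=
        List.drop_eq_nil_of_le (le_trans (List.length_take_le _ _) hik2)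
      rw [this]
      simp
    · -- row i is inside the safe prefix: the kept value is a real element of M[i]
      have hjr : 0 ≤ j ∧ j < (C : Int) := PySem.List.mem_pyRange_one.1 hj
      have hrow : PySem.List.pyGetD M (i : Int) [] = M[i] := by
        simp [PySem.List.pyGetD_natCast, List.getD, List.getElem?_eq_getElem hi]
      have hmem : PySem.List.pyGetD (PySem.List.pyGetD M (i : Int) []) j 0 ∈ M[i] := by
        rw [hrow]
        exact PySem.List.pyGetD_mem M[i] 0 (by
          have := hlen i (le_refl i) hik hi
          unfold PySem.Raise.InRange; omega)
      refine ⟨hxc, ?_⟩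
      have hilen : i < (M.take (k + 1)).length := by
        simp [List.length_take]; omega
      have hdrop : (M.take (k + 1)).drop i =
          (M.take (k + 1))[i] :: (M.take (k + 1)).drop (i + 1) :=
        List.drop_eq_getElem_cons hilen
      have hti : (M.take (k + 1))[i] = M[i] := List.getElem_take
      intro r hr
      rw [hdrop, hti] at hr
      rcases List.mem_cons.1 hr with rfl | hr'
      · exact hmem
      · exact hrest r hr'
  | case2 i common h =>
    rw [pyFilterLoop, dif_neg h] at hx
    rcases Nat.lt_or_ge i M.length with hi | hi
    · have hc : common.length = 0 := by omega
      rw [List.eq_nil_of_length_eq_zero hc] at hx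
      simp at hx
    · have : (M.take (k + 1)).drop i = [] :=
        List.drop_eq_nil_of_le (by simp [List.length_take]; omega)
      rw [this]
      exact ⟨hx, by simp⟩

-- first row empty: both programs return none without reading anything else
lemma core_empty_first (M : List (List Int)) (h1 : 1 ≤ M.length) (h0 : M.headD [] = []) :
    findCommonElement M = findCommonElement_alt M := by
  obtain ⟨rest, rfl⟩ : ∃ rest, M = [] :: rest := by
    rcases M with _ | ⟨r0, rest⟩
    · simp at h1
    · simp only [List.headD_cons] at h0
      exact ⟨rest, by rw [h0]⟩
  have hget0 : PySem.List.pyGetD ([] :: rest : List (List Int)) 0 [] = [] :=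
    PySem.List.pyGetD_zero_cons [] rest []
  have hmerge : pyMergeLoop [] (PySem.List.pyGetD ([] :: rest : List (List Int)) 1 []) 0 0 0
      PySem.Set.empty = [] := by
    rw [pyMergeLoop]; simp
  have hfilter : pyFilterLoop ([] :: rest) 0 ([] :: rest : List (List Int)).length 2 [] = [] := by
    rw [pyFilterLoop]; simp
  have hBempty : ((PySem.List.slice ([] :: rest : List (List Int)) (some 1) none).foldl
      (fun c row => PySem.Set.inter c (PySem.Set.ofList row))
      (PySem.Set.ofList (PySem.List.pyGetD ([] :: rest : List (List Int)) 0 []))) = [] := by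
    rw [List.eq_nil_iff_forall_not_mem]
    intro x hx
    have := (inter_fold_mem _ _ x).1 hx
    rw [hget0] at this
    simpa using this.1
  show (if (pyFilterLoop ([] :: rest) (PySem.List.pyGetD ([] :: rest : List (List Int)) 0 []).length
      ([] :: rest : List (List Int)).length 2
      (pyMergeLoop (PySem.List.pyGetD ([] :: rest : List (List Int)) 0 [])
        (PySem.List.pyGetD ([] :: rest : List (List Int)) 1 [])
        (PySem.List.pyGetD ([] :: rest : List (List Int)) 0 []).length 0 0 PySem.Set.empty)).length = 0
    then none
    else (pyFilterLoop ([] :: rest) (PySem.List.pyGetD ([] :: rest : List (List Int)) 0 []).length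
      ([] :: rest : List (List Int)).length 2
      (pyMergeLoop (PySem.List.pyGetD ([] :: rest : List (List Int)) 0 [])
        (PySem.List.pyGetD ([] :: rest : List (List Int)) 1 [])
        (PySem.List.pyGetD ([] :: rest : List (List Int)) 0 []).length 0 0 PySem.Set.empty)).head?) =
    findCommonElement_alt ([] :: rest)
  rw [hget0]
  simp only [List.length_nil]
  rw [hmerge, hfilter]
  show none = findCommonElement_alt ([] :: rest)
  rw [show findCommonElement_alt ([] :: rest) =
    (match (PySem.List.slice ([] :: rest : List (List Int)) (some 1) none).foldl
      (fun c row => PySem.Set.inter c (PySem.Set.ofList row))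
      (PySem.Set.ofList (PySem.List.pyGetD ([] :: rest : List (List Int)) 0 [])) with
    | [] => none
    | x :: _ => some x) from rfl]
  rw [hBempty]

-- if every element of row 0 is below row 1's first element, the merge loop only ever
-- advances p and collects nothing
lemma pyMergeLoop_all_lt (r0 r1 : List Int) (C : Nat) (hC : C ≤ r0.length)
    (h : ∀ x ∈ r0, x < PySem.List.pyGetD r1 0 0) (p q : Nat) (common : PySem.Set Int)
    (hq : q = 0) : pyMergeLoop r0 r1 C p q common = common := by
  induction p, q, common using pyMergeLoop.induct r0 r1 C with
  | case1 p q common hcond heq ih =>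
    subst hq
    have hlt : PySem.List.pyGetD r0 (p : Int) 0 < PySem.List.pyGetD r1 0 0 :=
      h _ (PySem.List.pyGetD_mem r0 0 (by unfold PySem.Raise.InRange; omega))
    rw [show ((0 : Nat) : Int) = (0 : Int) from rfl] at heq
    exact absurd heq (ne_of_lt hlt)
  | case2 p q common hcond hne hlt ih =>
    subst hq
    rw [pyMergeLoop, dif_pos hcond, if_neg hne, if_pos hlt]
    exact ih rfl
  | case3 p q common hcond hne hnlt ih =>
    subst hq
    have hlt : PySem.List.pyGetD r0 (p : Int) 0 < PySem.List.pyGetD r1 0 0 :=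
      h _ (PySem.List.pyGetD_mem r0 0 (by unfold PySem.Raise.InRange; omega))
    rw [show ((0 : Nat) : Int) = (0 : Int) from rfl] at hnlt
    exact absurd hlt hnlt
  | case4 p q common hcond =>
    rw [pyMergeLoop, dif_neg hcond]

-- row 0 entirely below row 1's first element, and no value common to all rows: both none
lemma core_all_lt (M : List (List Int)) (hlen2 : 2 ≤ M.length)
    (hlt : ∀ x ∈ M.headD [], x < ((M.drop 1).headD []).headD 0)
    (hnc : ∀ x ∈ M.headD [], ∃ r ∈ M, x ∉ r) :
    findCommonElement M = findCommonElement_alt M := by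
  obtain ⟨r0, r1, rest, rfl⟩ : ∃ r0 r1 rest, M = r0 :: r1 :: rest := by
    rcases M with _ | ⟨r0, _ | ⟨r1, rest⟩⟩
    · simp at hlen2
    · simp at hlen2
    · exact ⟨r0, r1, rest, rfl⟩
  simp only [List.headD_cons, List.drop_succ_cons, List.drop_zero] at hlt hnc
  have hget0 : PySem.List.pyGetD (r0 :: r1 :: rest) 0 [] = r0 :=
    PySem.List.pyGetD_zero_cons r0 (r1 :: rest) []
  have hget1 : PySem.List.pyGetD (r0 :: r1 :: rest) 1 [] = r1 := by
    simp [PySem.List.pyGetD, PySem.List.pyGet?, PySem.List.pyIdx?]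
  have hhead : PySem.List.pyGetD r1 0 0 = r1.headD 0 := by
    cases r1 <;> simp [PySem.List.pyGetD, PySem.List.pyGet?, PySem.List.pyIdx?]
  have hmerge : pyMergeLoop r0 r1 r0.length 0 0 PySem.Set.empty = [] :=
    pyMergeLoop_all_lt r0 r1 r0.length (le_refl _)
      (by rw [hhead]; exact hlt) 0 0 PySem.Set.empty rfl
  have hfilter : pyFilterLoop (r0 :: r1 :: rest) r0.length (r0 :: r1 :: rest).length 2 [] = [] := by
    rw [pyFilterLoop]; simp
  have hBempty : ((PySem.List.slice (r0 :: r1 :: rest : List (List Int)) (some 1) none).foldl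
      (fun c row => PySem.Set.inter c (PySem.Set.ofList row))
      (PySem.Set.ofList (PySem.List.pyGetD (r0 :: r1 :: rest) 0 []))) = [] := by
    rw [List.eq_nil_iff_forall_not_mem]
    intro x hx
    have hsl : PySem.List.slice (r0 :: r1 :: rest : List (List Int)) (some 1) none = r1 :: rest := by
      rw [PySem.List.slice_from_one]; rfl
    rw [hsl, hget0] at hx
    obtain ⟨hx0, hall⟩ := (inter_fold_mem _ _ x).1 hx
    rw [PySem.Set.mem_ofList] at hx0
    obtain ⟨r, hr, hxr⟩ := hnc x hx0
    rcases List.mem_cons.1 hr with heq | hr'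
    · exact hxr (heq ▸ hx0)
    · exact hxr (hall r hr')
  show (if (pyFilterLoop (r0 :: r1 :: rest)
      (PySem.List.pyGetD (r0 :: r1 :: rest) 0 []).length (r0 :: r1 :: rest).length 2
      (pyMergeLoop (PySem.List.pyGetD (r0 :: r1 :: rest) 0 [])
        (PySem.List.pyGetD (r0 :: r1 :: rest) 1 [])
        (PySem.List.pyGetD (r0 :: r1 :: rest) 0 []).length 0 0 PySem.Set.empty)).length = 0
    then none
    else (pyFilterLoop (r0 :: r1 :: rest)
      (PySem.List.pyGetD (r0 :: r1 :: rest) 0 []).length (r0 :: r1 :: rest).length 2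
      (pyMergeLoop (PySem.List.pyGetD (r0 :: r1 :: rest) 0 [])
        (PySem.List.pyGetD (r0 :: r1 :: rest) 1 [])
        (PySem.List.pyGetD (r0 :: r1 :: rest) 0 []).length 0 0 PySem.Set.empty)).head?) =
    findCommonElement_alt (r0 :: r1 :: rest)
  rw [hget0, hget1, hmerge, hfilter]
  show none = findCommonElement_alt (r0 :: r1 :: rest)
  rw [show findCommonElement_alt (r0 :: r1 :: rest) =
    (match (PySem.List.slice (r0 :: r1 :: rest : List (List Int)) (some 1) none).foldl
      (fun c row => PySem.Set.inter c (PySem.Set.ofList row))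
      (PySem.Set.ofList (PySem.List.pyGetD (r0 :: r1 :: rest) 0 [])) with
    | [] => none
    | x :: _ => some x) from rfl]
  rw [hBempty]

-- a prefix of rows with no shared value: both programs return none
lemma core_prefix (M : List (List Int)) (hlen2 : 2 ≤ M.length) (k : Nat)
    (hk : k < M.length) (hk1 : 1 ≤ k)
    (hge : ∀ r ∈ (M.take (k + 1)).drop 1, (M.headD []).length ≤ r.length)
    (hnc : ∀ x ∈ M.headD [], ∃ r ∈ M.take (k + 1), x ∉ r) :
    findCommonElement M = findCommonElement_alt M := by
  obtain ⟨k', rfl⟩ : ∃ k', k = k' + 1 := ⟨k - 1, by omega⟩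
  obtain ⟨r0, r1, rest, rfl⟩ : ∃ r0 r1 rest, M = r0 :: r1 :: rest := by
    rcases M with _ | ⟨r0, _ | ⟨r1, rest⟩⟩
    · simp at hlen2
    · simp at hlen2
    · exact ⟨r0, r1, rest, rfl⟩
  simp only [List.headD_cons] at hge hnc
  have htake : (r0 :: r1 :: rest : List (List Int)).take (k' + 1 + 1) =
      r0 :: r1 :: rest.take k' := rfl
  rw [htake] at hge hnc
  have hget0 : PySem.List.pyGetD (r0 :: r1 :: rest) 0 [] = r0 :=
    PySem.List.pyGetD_zero_cons r0 (r1 :: rest) []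
  have hget1 : PySem.List.pyGetD (r0 :: r1 :: rest) 1 [] = r1 := by
    simp [PySem.List.pyGetD, PySem.List.pyGet?, PySem.List.pyIdx?]
  have hC1 : r0.length ≤ r1.length := hge r1 (by simp)
  have hlen : ∀ j, 2 ≤ j → j ≤ k' + 1 →
      ∀ hj : j < (r0 :: r1 :: rest : List (List Int)).length,
      r0.length ≤ (r0 :: r1 :: rest : List (List Int))[j].length := by
    intro j hj2 hjk hj
    apply hge
    have : (r0 :: r1 :: rest : List (List Int))[j] = (rest.take k')[j - 2]'(by
        simp [List.length_take]
        constructor <;> [omega; (simp at hj; omega)]) := by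
      rcases j with _ | _ | j
      · omega
      · omega
      · simp only [List.getElem_cons_succ]
        have h2 : j + 1 + 1 - 2 = j := by omega
        simp only [h2, List.getElem_take]
    rw [this]
    right
    exact List.getElem_mem _
  have hAempty : pyFilterLoop (r0 :: r1 :: rest) r0.length (r0 :: r1 :: rest).length 2
      (pyMergeLoop r0 r1 r0.length 0 0 PySem.Set.empty) = [] := by
    rw [List.eq_nil_iff_forall_not_mem]
    intro x hx
    obtain ⟨hxm, hrest⟩ :=
      pyFilterLoop_subset_prefix (r0 :: r1 :: rest) r0.length 2 (k' + 1) hlen _ x hx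
    rw [htake] at hrest
    rcases pyMergeLoop_subset r0 r1 r0.length 0 0 (le_refl _) hC1
        PySem.Set.empty x hxm with h' | ⟨hx0, hx1⟩
    · simp [PySem.Set.empty] at h'
    obtain ⟨r, hr, hxr⟩ := hnc x hx0
    rcases List.mem_cons.1 hr with heq | hr'
    · exact hxr (heq ▸ hx0)
    rcases List.mem_cons.1 hr' with heq | hr''
    · exact hxr (heq ▸ hx1)
    · exact hxr (hrest r (by simpa using hr''))
  have hBempty : ((PySem.List.slice (r0 :: r1 :: rest : List (List Int)) (some 1) none).foldl
      (fun c row => PySem.Set.inter c (PySem.Set.ofList row))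
      (PySem.Set.ofList (PySem.List.pyGetD (r0 :: r1 :: rest) 0 []))) = [] := by
    rw [List.eq_nil_iff_forall_not_mem]
    intro x hx
    have hsl : PySem.List.slice (r0 :: r1 :: rest : List (List Int)) (some 1) none = r1 :: rest := by
      rw [PySem.List.slice_from_one]; rfl
    rw [hsl, hget0] at hx
    obtain ⟨hx0, hall⟩ := (inter_fold_mem _ _ x).1 hx
    rw [PySem.Set.mem_ofList] at hx0
    obtain ⟨r, hr, hxr⟩ := hnc x hx0
    rcases List.mem_cons.1 hr with rfl | hr'
    · exact hxr hx0
    rcases List.mem_cons.1 hr' with heq | hr''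
    · exact hxr (heq ▸ hall r1 (by simp))
    · exact hxr (hall r (by simp [List.mem_of_mem_take hr'']))
  show (if (pyFilterLoop (r0 :: r1 :: rest)
      (PySem.List.pyGetD (r0 :: r1 :: rest) 0 []).length (r0 :: r1 :: rest).length 2
      (pyMergeLoop (PySem.List.pyGetD (r0 :: r1 :: rest) 0 [])
        (PySem.List.pyGetD (r0 :: r1 :: rest) 1 [])
        (PySem.List.pyGetD (r0 :: r1 :: rest) 0 []).length 0 0 PySem.Set.empty)).length = 0
    then none
    else (pyFilterLoop (r0 :: r1 :: rest)
      (PySem.List.pyGetD (r0 :: r1 :: rest) 0 []).length (r0 :: r1 :: rest).length 2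
      (pyMergeLoop (PySem.List.pyGetD (r0 :: r1 :: rest) 0 [])
        (PySem.List.pyGetD (r0 :: r1 :: rest) 1 [])
        (PySem.List.pyGetD (r0 :: r1 :: rest) 0 []).length 0 0 PySem.Set.empty)).head?) =
    findCommonElement_alt (r0 :: r1 :: rest)
  rw [hget0, hget1, hAempty]
  show none = findCommonElement_alt (r0 :: r1 :: rest)
  rw [show findCommonElement_alt (r0 :: r1 :: rest) =
    (match (PySem.List.slice (r0 :: r1 :: rest : List (List Int)) (some 1) none).foldl
      (fun c row => PySem.Set.inter c (PySem.Set.ofList row))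
      (PySem.Set.ofList (PySem.List.pyGetD (r0 :: r1 :: rest) 0 [])) with
    | [] => none
    | x :: _ => some x) from rfl]
  rw [hBempty]

-- A = B on the main (sorted, rectangular, at-most-one-common) case of Pre_
lemma findCommonElement_eq_core (M : List (List Int)) (hlen2 : 2 ≤ M.length)
    (hrect : ∀ r ∈ M, r.length = (M.headD []).length)
    (hs0 : (M.headD []).Pairwise (· ≤ ·))
    (hs1 : ((M.drop 1).headD []).Pairwise (· ≤ ·))
    (huniq : ∀ x ∈ M.headD [], ∀ y ∈ M.headD [],
      (∀ r ∈ M, x ∈ r) → (∀ r ∈ M, y ∈ r) → x = y) :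
    findCommonElement M = findCommonElement_alt M := by
  obtain ⟨r0, r1, rest, rfl⟩ : ∃ r0 r1 rest, M = r0 :: r1 :: rest := by
    rcases M with _ | ⟨r0, _ | ⟨r1, rest⟩⟩
    · simp at hlen2
    · simp at hlen2
    · exact ⟨r0, r1, rest, rfl⟩
  have hget0 : PySem.List.pyGetD (r0 :: r1 :: rest) 0 [] = r0 :=
    PySem.List.pyGetD_zero_cons r0 (r1 :: rest) []
  have hget1 : PySem.List.pyGetD (r0 :: r1 :: rest) 1 [] = r1 := by
    simp [PySem.List.pyGetD, PySem.List.pyGet?, PySem.List.pyIdx?]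
  simp only [List.headD_cons] at hrect hs0 huniq
  simp only [List.drop_succ_cons, List.drop_zero, List.headD_cons] at hs1
  have hC1 : r1.length = r0.length := hrect r1 (by simp)
  have hu' : ∀ x y, (∀ r ∈ r0 :: r1 :: rest, x ∈ r) → (∀ r ∈ r0 :: r1 :: rest, y ∈ r) → x = y :=
    fun x y hx hy =>
      huniq x (hx r0 (by simp)) y (hy r0 (by simp)) hx hy
  have hSA_mem : ∀ x, x ∈ pyFilterLoop (r0 :: r1 :: rest) r0.length (r0 :: r1 :: rest).length 2
      (pyMergeLoop r0 r1 r0.length 0 0 PySem.Set.empty) ↔ ∀ r ∈ r0 :: r1 :: rest, x ∈ r := by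
    intro x
    rw [pyFilterLoop_mem (r0 :: r1 :: rest) r0.length 2 hrect,
      pyMergeLoop_mem r0 r1 hs0 hs1 r0.length 0 0 rfl hC1]
    simp only [List.drop_zero, PySem.Set.empty, List.not_mem_nil, false_or,
      List.drop_succ_cons, List.drop_zero, List.mem_cons]
    constructor
    · rintro ⟨⟨h0, h1⟩, hrest⟩ r hr
      rcases hr with rfl | rfl | hr
      · exact h0
      · exact h1
      · exact hrest r hr
    · intro hall
      exact ⟨⟨hall r0 (Or.inl rfl), hall r1 (Or.inr (Or.inl rfl))⟩,
        fun r hr => hall r (Or.inr (Or.inr hr))⟩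
  have hSA_nodup : (pyFilterLoop (r0 :: r1 :: rest) r0.length (r0 :: r1 :: rest).length 2
      (pyMergeLoop r0 r1 r0.length 0 0 PySem.Set.empty)).Nodup :=
    pyFilterLoop_nodup _ _ _ 2 _ (pyMergeLoop_nodup r0 r1 r0.length 0 0 _ List.nodup_nil)
  have hslice : PySem.List.slice (r0 :: r1 :: rest) (some 1) none = r1 :: rest := by
    rw [PySem.List.slice_from_one]; rfl
  have hSB_mem : ∀ x, x ∈ (PySem.List.slice (r0 :: r1 :: rest) (some 1) none).foldl
      (fun c row => PySem.Set.inter c (PySem.Set.ofList row))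
      (PySem.Set.ofList (PySem.List.pyGetD (r0 :: r1 :: rest) 0 [])) ↔
      ∀ r ∈ r0 :: r1 :: rest, x ∈ r := by
    intro x
    rw [hslice, hget0, inter_fold_mem, PySem.Set.mem_ofList]
    simp only [List.mem_cons]
    constructor
    · rintro ⟨h0, hrest⟩ r hr
      rcases hr with rfl | hr
      · exact h0
      · exact hrest r hr
    · intro hall
      exact ⟨hall r0 (Or.inl rfl), fun r hr => hall r (Or.inr hr)⟩
  have hSB_nodup : ((PySem.List.slice (r0 :: r1 :: rest) (some 1) none).foldl
      (fun c row => PySem.Set.inter c (PySem.Set.ofList row))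
      (PySem.Set.ofList (PySem.List.pyGetD (r0 :: r1 :: rest) 0 []))).Nodup :=
    inter_fold_nodup _ _ (PySem.Set.nodup_ofList _)
  have hST := eq_of_subsingleton_char _ _ hSA_nodup hSB_nodup _ hSA_mem hSB_mem hu'
  show (if (pyFilterLoop (r0 :: r1 :: rest)
      (PySem.List.pyGetD (r0 :: r1 :: rest) 0 []).length (r0 :: r1 :: rest).length 2
      (pyMergeLoop (PySem.List.pyGetD (r0 :: r1 :: rest) 0 [])
        (PySem.List.pyGetD (r0 :: r1 :: rest) 1 [])
        (PySem.List.pyGetD (r0 :: r1 :: rest) 0 []).length 0 0 PySem.Set.empty)).length = 0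
    then none
    else (pyFilterLoop (r0 :: r1 :: rest)
      (PySem.List.pyGetD (r0 :: r1 :: rest) 0 []).length (r0 :: r1 :: rest).length 2
      (pyMergeLoop (PySem.List.pyGetD (r0 :: r1 :: rest) 0 [])
        (PySem.List.pyGetD (r0 :: r1 :: rest) 1 [])
        (PySem.List.pyGetD (r0 :: r1 :: rest) 0 []).length 0 0 PySem.Set.empty)).head?) =
    findCommonElement_alt (r0 :: r1 :: rest)
  rw [hget0, hget1, hST]
  show _ = (match (PySem.List.slice (r0 :: r1 :: rest) (some 1) none).foldl
      (fun c row => PySem.Set.inter c (PySem.Set.ofList row))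
      (PySem.Set.ofList (PySem.List.pyGetD (r0 :: r1 :: rest) 0 [])) with
    | [] => none
    | x :: _ => some x)
  rcases hB : (PySem.List.slice (r0 :: r1 :: rest) (some 1) none).foldl
      (fun c row => PySem.Set.inter c (PySem.Set.ofList row))
      (PySem.Set.ofList (PySem.List.pyGetD (r0 :: r1 :: rest) 0 [])) with _ | ⟨x, s⟩
  · simp
  · simp

-- ===== VERDICT (by name: the statement is the Claim_ definition above) =====
theorem findCommonElement_spec : Claim_equal_findCommonElement := by
  intro M _hdom hpre
  unfold Pre_findCommonElement at hpre
  rcases hpre with ⟨h1, h0⟩ | ⟨h2, _hne, hlt, hnc⟩ | ⟨h2, k, hk, hk1, hge, hnc⟩ |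
    ⟨h2, hrect, hs0, hs1, huniq⟩
  · exact core_empty_first M h1 h0
  · exact core_all_lt M h2 hlt hnc
  · exact core_prefix M h2 k hk hk1 hge hnc
  · exact findCommonElement_eq_core M h2 hrect hs0 hs1 huniq
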